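-- pv_equiv track=rewrite | github.com/TuGengs/LeetCode | src/easy/Spell_the_Word.py | countCharacters
-- ===== SOURCE A (Python) =====
-- def countCharacters(words, chars):
--     """
--     # :param words:   List[str]
--     # :param chars:   str
--     # :return:        int
--     """
--     import collections
--     chars_cnt = collections.Counter(chars)
--
--     nums = 0
--
--     for word in words:
--         word_cnt = collections.Counter(word)
--         for w in word_cnt:
--             if word_cnt[w] > chars_cnt[w]:
--                 break
--         else:
--             nums += len(word)
--
--     return nums
-- ===== SOURCE B (Python) =====
-- def countCharacters(words, chars):
--     import collections
--     base = collections.Counter(chars)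
--     total = 0
--     for word in words:
--         avail = base.copy()
--         ok = True
--         for ch in word:
--             if avail[ch] <= 0:
--                 ok = False
--                 break
--             avail[ch] -= 1
--         if ok:
--             total += len(word)
--     return total
-- ===== Notes on version B (the rewrite author's own statement) =====
-- stated objective: alternative
-- what changed: B builds Counter(chars) once and, per word, greedily decrements a copy while walking the word's raw characters (bailing when a count hits zero), instead of building a per-word Counter and comparing it key-by-key against Counter(chars).
import Mathlib
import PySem

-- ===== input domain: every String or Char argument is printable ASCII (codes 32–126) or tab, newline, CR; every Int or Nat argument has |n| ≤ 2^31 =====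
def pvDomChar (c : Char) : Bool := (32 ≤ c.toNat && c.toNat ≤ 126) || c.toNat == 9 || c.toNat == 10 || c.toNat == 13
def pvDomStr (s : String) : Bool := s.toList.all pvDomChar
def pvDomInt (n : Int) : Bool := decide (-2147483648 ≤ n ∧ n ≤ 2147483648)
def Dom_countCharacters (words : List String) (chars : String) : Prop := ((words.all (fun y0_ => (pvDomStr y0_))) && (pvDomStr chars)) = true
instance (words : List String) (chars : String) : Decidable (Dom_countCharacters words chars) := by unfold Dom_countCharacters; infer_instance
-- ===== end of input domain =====

-- B builds Counter(chars) once and greedily decrements a copy while walking each word's raw characters, instead of comparing a per-word Counter against Counter(chars) key by key (objective: alternative; return value only, no mutation involved).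

-- ===== PORT A =====
-- inner 'for w in word_cnt: … break / else' : returns true iff the loop breaks
def aBreak (wordCnt charsCnt : PySem.Dict Char Int) : List Char → Bool
  | [] => false
  | w :: rest =>
    if wordCnt.getD w 0 > charsCnt.getD w 0 then true
    else aBreak wordCnt charsCnt rest

def countCharacters (words : List String) (chars : String) : Int :=
  let charsCnt := PySem.Dict.counter chars.toList
  words.foldl (fun nums word =>
    let wordCnt := PySem.Dict.counter word.toList
    if aBreak wordCnt charsCnt wordCnt.keys then nums
    else nums + PySem.Str.len word) 0

-- ===== PORT B =====
-- inner 'for ch in word: …' : true iff every character could be taken from avail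
def bGreedy (avail : PySem.Dict Char Int) : List Char → Bool
  | [] => true
  | ch :: rest =>
    if avail.getD ch 0 ≤ 0 then false
    else bGreedy (avail.modify ch 0 (· - 1)) rest

def countCharacters_alt (words : List String) (chars : String) : Int :=
  let base := PySem.Dict.counter chars.toList
  words.foldl (fun total word =>
    if bGreedy base word.toList then total + PySem.Str.len word else total) 0

-- ===== PRECONDITION & SPEC =====
def Spec_countCharacters (words : List String) (chars : String) (out : Int) : Prop := out = countCharacters_alt words chars
instance (words : List String) (chars : String) (out : Int) : Decidable (Spec_countCharacters words chars out) := by unfold Spec_countCharacters; infer_instance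

-- ===== CLAIM (what is proved, stated in full; the proofs are below) =====
def Claim_equal_countCharacters : Prop := ∀ (words : List String) (chars : String), Dom_countCharacters words chars → Spec_countCharacters words chars (countCharacters words chars)

-- ===== LEMMAS AND PROOFS =====

-- A's key loop: no break iff every listed key's word-count fits within chars-count
theorem aBreak_eq_false_iff (wordCnt charsCnt : PySem.Dict Char Int) (ks : List Char) :
    aBreak wordCnt charsCnt ks = false ↔ ∀ c ∈ ks, wordCnt.getD c 0 ≤ charsCnt.getD c 0 := by
  induction ks with
  | nil => simp [aBreak]
  | cons w rest ih =>
    by_cases h : wordCnt.getD w 0 > charsCnt.getD w 0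
    · rw [show aBreak wordCnt charsCnt (w :: rest) = true from by simp [aBreak, h]]
      constructor
      · intro hf; simp at hf
      · intro hall
        exact absurd (hall w (by simp)) (by omega)
    · rw [show aBreak wordCnt charsCnt (w :: rest) = aBreak wordCnt charsCnt rest from by
        simp [aBreak, h], ih]
      constructor
      · intro hall c hc
        rcases List.mem_cons.mp hc with rfl | hc'
        · omega
        · exact hall c hc'
      · intro hall c hc
        exact hall c (List.mem_cons_of_mem _ hc)

-- B's greedy loop: succeeds iff every character of the list fits within avail
theorem bGreedy_eq_true_iff (l : List Char) (d : PySem.Dict Char Int) :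
    bGreedy d l = true ↔ ∀ c ∈ l, (l.count c : Int) ≤ d.getD c 0 := by
  induction l generalizing d with
  | nil => simp [bGreedy]
  | cons ch rest ih =>
    by_cases h : d.getD ch 0 ≤ 0
    · rw [show bGreedy d (ch :: rest) = false from by simp [bGreedy, h]]
      constructor
      · intro hf; simp at hf
      · intro hall
        have := hall ch (by simp)
        rw [List.count_cons_self] at this
        push_cast at this
        omega
    · rw [show bGreedy d (ch :: rest) = bGreedy (d.modify ch 0 (· - 1)) rest from by
        simp [bGreedy, h], ih]
      constructor
      · intro hall c hc
        rcases List.mem_cons.mp hc with rfl | hc'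
        · by_cases hmem : c ∈ rest
          · have := hall c hmem
            rw [PySem.Dict.getD_modify, if_pos rfl] at this
            rw [List.count_cons_self]
            push_cast
            omega
          · rw [List.count_cons_self]
            have h0 : rest.count c = 0 := List.count_eq_zero.mpr hmem
            rw [h0]
            push_cast
            omega
        · rcases eq_or_ne c ch with rfl | hne
          · have := hall c hc'
            rw [PySem.Dict.getD_modify, if_pos rfl] at this
            rw [List.count_cons_self]
            push_cast
            omega
          · have := hall c hc'
            rw [PySem.Dict.getD_modify, if_neg hne] at this
            rw [List.count_cons_of_ne hne.symm]
            exact this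
      · intro hall c hc
        rw [PySem.Dict.getD_modify]
        rcases eq_or_ne c ch with rfl | hne
        · rw [if_pos rfl]
          have := hall c (by simp)
          rw [List.count_cons_self] at this
          push_cast at this
          omega
        · rw [if_neg hne]
          have := hall c (List.mem_cons_of_mem _ hc)
          rw [List.count_cons_of_ne hne.symm] at this
          exact this

-- per-word agreement of the two feasibility tests
theorem perWord (word chars : String) :
    (aBreak (PySem.Dict.counter word.toList) (PySem.Dict.counter chars.toList)
       (PySem.Dict.counter word.toList).keys = false)
      ↔ bGreedy (PySem.Dict.counter chars.toList) word.toList = true := by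
  rw [aBreak_eq_false_iff, bGreedy_eq_true_iff]
  constructor
  · intro h c hc
    have hk : c ∈ (PySem.Dict.counter word.toList).keys := by
      rw [PySem.Dict.keys_counter, PySem.Set.mem_ofList]; exact hc
    have := h c hk
    simpa [PySem.Dict.getD_counter] using this
  · intro h c hk
    rw [PySem.Dict.keys_counter, PySem.Set.mem_ofList] at hk
    have := h c hk
    simpa [PySem.Dict.getD_counter] using this

-- ===== VERDICT (by name: the statement is the Claim_ definition above) =====
theorem countCharacters_spec : Claim_equal_countCharacters := by
  intro words chars _
  unfold Spec_countCharacters countCharacters countCharacters_alt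
  show List.foldl (fun nums word =>
      if aBreak (PySem.Dict.counter word.toList) (PySem.Dict.counter chars.toList)
          (PySem.Dict.counter word.toList).keys then nums
      else nums + PySem.Str.len word) 0 words
    = List.foldl (fun total word =>
      if bGreedy (PySem.Dict.counter chars.toList) word.toList then total + PySem.Str.len word
      else total) 0 words
  have hfun : (fun (nums : Int) (word : String) =>
      if aBreak (PySem.Dict.counter word.toList) (PySem.Dict.counter chars.toList)
          (PySem.Dict.counter word.toList).keys then nums
      else nums + PySem.Str.len word)
    = (fun (total : Int) (word : String) =>
      if bGreedy (PySem.Dict.counter chars.toList) word.toList then total + PySem.Str.len word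
      else total) := by
    funext nums word
    by_cases hb : bGreedy (PySem.Dict.counter chars.toList) word.toList = true
    · rw [(perWord word chars).mpr hb, hb]
      simp
    · have hbr : aBreak (PySem.Dict.counter word.toList) (PySem.Dict.counter chars.toList)
          (PySem.Dict.counter word.toList).keys = true := by
        cases hx : aBreak (PySem.Dict.counter word.toList) (PySem.Dict.counter chars.toList)
            (PySem.Dict.counter word.toList).keys with
        | false => exact absurd ((perWord word chars).mp hx) hb
        | true => rfl
      rw [hbr, Bool.not_eq_true] at *
      rw [hbr, hb]
      simp
  rw [hfun]
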